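-- pv_equiv track=rewrite | github.com/antoniolg/agent-kit | skills/youtube-publish/scripts/dub_srt_utils.py | split_srt_blocks
-- ===== SOURCE A (Python) =====
-- def split_srt_blocks(text: str) -> list[str]:
--     blocks: list[str] = []
--     current: list[str] = []
--     for line in text.splitlines():
--         if line.strip() == "":
--             if current:
--                 blocks.append("\n".join(current))
--                 current = []
--             continue
--         current.append(line)
--     if current:
--         blocks.append("\n".join(current))
--     return blocks
-- ===== SOURCE B (Python) =====
-- def split_srt_blocks(text: str) -> list[str]:
--     def rec(lines: list[str]) -> list[str]:
--         if not lines: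
--             return []
--         if not lines[0].strip():
--             return rec(lines[1:])
--         k = 0
--         while k < len(lines) and lines[k].strip():
--             k += 1
--         return ["\n".join(lines[:k])] + rec(lines[k:])
--     return rec(text.splitlines())
-- ===== Notes on version B (the rewrite author's own statement) =====
-- stated objective: alternative
-- what changed: Replaces A's single-pass accumulator state machine (blocks/current lists with flush-on-blank and a trailing flush) by a recursive span decomposition: skip blank lines, take the maximal non-blank run as one block, recurse on the rest.
import Mathlib
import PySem

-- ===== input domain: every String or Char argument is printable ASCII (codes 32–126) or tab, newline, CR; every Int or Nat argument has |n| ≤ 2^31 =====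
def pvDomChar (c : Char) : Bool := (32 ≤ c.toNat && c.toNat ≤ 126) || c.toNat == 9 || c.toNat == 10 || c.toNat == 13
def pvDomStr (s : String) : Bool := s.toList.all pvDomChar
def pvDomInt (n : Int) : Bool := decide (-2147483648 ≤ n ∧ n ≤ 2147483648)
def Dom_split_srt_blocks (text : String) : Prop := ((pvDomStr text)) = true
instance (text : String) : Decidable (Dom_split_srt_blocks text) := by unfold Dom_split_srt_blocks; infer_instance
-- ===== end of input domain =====

-- B replaces A's accumulator state machine by a recursive span decomposition (same cost; objective: alternative).


-- ===== PORT A =====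
-- A's loop step: state (blocks, current); blank line flushes current, non-blank line is appended.
def pvStepA (st : List String × List String) (line : String) : List String × List String :=
  if PySem.Str.strip line == "" then
    if !st.2.isEmpty then (st.1 ++ [PySem.Str.join "\n" st.2], ([] : List String)) else st
  else (st.1, st.2 ++ [line])

def split_srt_blocks (text : String) : List String :=
  let st := (PySem.Str.splitlines text).foldl pvStepA (([] : List String), ([] : List String))
  if !st.2.isEmpty then st.1 ++ [PySem.Str.join "\n" st.2] else st.1

-- ===== PORT B =====
def pvNonblank (l : String) : Bool := !(PySem.Str.strip l == "")

-- B's recursion: skip blank lines; otherwise the maximal non-blank run is one block, recurse on the rest.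
def pvBlocksRec : List String → List String
  | [] => []
  | l :: ls =>
    if pvNonblank l then
      PySem.Str.join "\n" ((l :: ls).takeWhile pvNonblank)
        :: pvBlocksRec ((l :: ls).dropWhile pvNonblank)
    else pvBlocksRec ls
termination_by ls => ls.length
decreasing_by
  all_goals simp_all [List.dropWhile_cons]
  have h := List.length_dropWhile_le pvNonblank ls
  omega

def split_srt_blocks_alt (text : String) : List String :=
  pvBlocksRec (PySem.Str.splitlines text)

-- ===== PRECONDITION & SPEC =====
def Spec_split_srt_blocks (text : String) (out : List String) : Prop := out = split_srt_blocks_alt text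
instance (text : String) (out : List String) : Decidable (Spec_split_srt_blocks text out) := by unfold Spec_split_srt_blocks; infer_instance

-- ===== CLAIM (what is proved, stated in full; the proofs are below) =====
def Claim_equal_split_srt_blocks : Prop := ∀ (text : String), Dom_split_srt_blocks text → Spec_split_srt_blocks text (split_srt_blocks text)

-- ===== LEMMAS AND PROOFS =====

-- Proof-side runner: fold A's step over the lines, then flush.
def pvRunA (st : List String × List String) : List String → List String
  | [] => if !st.2.isEmpty then st.1 ++ [PySem.Str.join "\n" st.2] else st.1
  | l :: ls => pvRunA (pvStepA st l) ls

theorem pvRunA_eq_foldl (lines : List String) : ∀ st,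
    pvRunA st lines =
      (let f := lines.foldl pvStepA st;
       if !f.2.isEmpty then f.1 ++ [PySem.Str.join "\n" f.2] else f.1) := by
  induction lines with
  | nil => intro st; rfl
  | cons l ls ih => intro st; simpa [pvRunA] using ih (pvStepA st l)

-- Invariant of A's loop: running from state (blocks, cur) yields blocks followed by B's
-- recursion, with a pending non-empty cur extending the first non-blank run.
theorem pvRunA_eq (lines : List String) : ∀ (blocks cur : List String),
    pvRunA (blocks, cur) lines =
    blocks ++ (if cur.isEmpty then pvBlocksRec lines
               else PySem.Str.join "\n" (cur ++ lines.takeWhile pvNonblank)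
                    :: pvBlocksRec (lines.dropWhile pvNonblank)) := by
  induction lines with
  | nil =>
    intro blocks cur
    cases cur <;> simp [pvRunA, pvBlocksRec]
  | cons l ls ih =>
    intro blocks cur
    by_cases hb : PySem.Str.strip l == ""
    · -- blank line
      have hnb : pvNonblank l = false := by simp [pvNonblank, hb]
      cases cur with
      | nil =>
        have hstep : pvStepA (blocks, []) l = (blocks, []) := by simp [pvStepA, hb]
        rw [pvRunA, hstep, ih blocks []]
        simp [pvBlocksRec, hnb]
      | cons c cs =>
        have hstep : pvStepA (blocks, c :: cs) l =
            (blocks ++ [PySem.Str.join "\n" (c :: cs)], []) := by simp [pvStepA, hb]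
        rw [pvRunA, hstep, ih (blocks ++ [PySem.Str.join "\n" (c :: cs)]) []]
        simp [pvBlocksRec, hnb, List.append_assoc]
    · -- non-blank line
      have hnb : pvNonblank l = true := by simp [pvNonblank, hb]
      have hstep : pvStepA (blocks, cur) l = (blocks, cur ++ [l]) := by simp [pvStepA, hb]
      rw [pvRunA, hstep, ih blocks (cur ++ [l])]
      cases cur with
      | nil => simp [pvBlocksRec, hnb]
      | cons c cs => simp [hnb, List.append_assoc]

-- ===== VERDICT (by name: the statement is the Claim_ definition above) =====
theorem split_srt_blocks_spec : Claim_equal_split_srt_blocks := by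
  intro text _
  unfold Spec_split_srt_blocks split_srt_blocks split_srt_blocks_alt
  have h := (pvRunA_eq_foldl (PySem.Str.splitlines text) ([], [])).symm.trans
    (pvRunA_eq (PySem.Str.splitlines text) [] [])
  simpa using h
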